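-- pv_equiv track=rewrite | github.com/SangYeongLee/pr_practice | back_tracking/password.py | making
-- ===== SOURCE A (Python) =====
-- def making(chars,l):
-- 	ret = []
-- 	if l==1:
-- 		for c in chars:
-- 			ret.append(c)
-- 		return ret
--
-- 	for i in range(len(chars)-l+1):
-- 		for sub in making(chars[i+1:],l-1):
-- 			ret.append(chars[i]+sub)
--
-- 	return ret
-- ===== SOURCE B (Python) =====
-- def making(chars, l):
--     if l < 1 or l > len(chars):
--         return []
--
--     def go(cs, k):
--         if k == 0:
--             return [""]
--         if len(cs) < k:
--             return []
--         first = [cs[0] + s for s in go(cs[1:], k - 1)]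
--         return first + go(cs[1:], k)
--
--     return go(chars, l)
-- ===== Notes on version B (the rewrite author's own statement) =====
-- stated objective: alternative
-- what changed: Replaced A's recursion on the length l with an index loop and repeated slicing by a binary include/exclude-the-head structural recursion on the list (no loops, no index arithmetic), behind an up-front guard for l out of range.
-- crash fix: For l <= 0 A recurses forever and raises RecursionError, while B returns []. — e.g. on making(["a"], 0): A raises RecursionError, B returns []
import Mathlib
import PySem

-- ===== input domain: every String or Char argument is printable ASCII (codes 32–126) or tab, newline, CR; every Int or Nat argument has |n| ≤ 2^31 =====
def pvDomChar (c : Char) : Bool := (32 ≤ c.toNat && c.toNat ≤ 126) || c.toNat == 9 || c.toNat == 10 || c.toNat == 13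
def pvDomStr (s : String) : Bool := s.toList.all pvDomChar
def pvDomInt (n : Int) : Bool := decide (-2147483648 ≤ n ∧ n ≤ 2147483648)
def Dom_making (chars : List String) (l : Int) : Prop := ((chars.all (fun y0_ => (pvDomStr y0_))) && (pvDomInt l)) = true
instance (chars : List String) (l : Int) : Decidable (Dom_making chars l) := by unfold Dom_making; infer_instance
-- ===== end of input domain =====

-- B replaces A's recursion on l (index loop + slicing) by include/exclude structural recursion on the list; proved equal for l ≥ 1 (A raises RecursionError for l ≤ 0).


-- ===== PORT A =====
-- A's recursion on l, as Nat fuel l.toNat (Pre_ admits only l ≥ 1, where fuel = l exactly;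
-- for l ≤ 0 Python A recurses forever / raises, excluded by Pre_).
def makingA : List String → Nat → List String
  | chars, 1 =>
      -- ret = []; for c in chars: ret.append(c); return ret
      chars.foldl (fun ret c => ret ++ [c]) []
  | chars, Nat.succ (Nat.succ n) =>
      -- for i in range(len(chars)-l+1): for sub in making(chars[i+1:], l-1): ret.append(chars[i]+sub)
      (List.range (chars.length + 1 - (n + 2))).foldl
        (fun ret i =>
          (makingA (chars.drop (i + 1)) (n + 1)).foldl
            (fun ret2 sub => ret2 ++ [chars.getD i "" ++ sub]) ret) []
  | _, 0 => []  -- unreachable under Pre_making (l ≥ 1)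

def making (chars : List String) (l : Int) : List String := makingA chars l.toNat

-- ===== PORT B =====
-- go(cs,k): k==0 → [""]; len(cs)<k → []; else take-head ++ skip-head
def goB : List String → Nat → List String
  | _, 0 => [""]
  | cs, Nat.succ k =>
      if cs.length < k + 1 then []
      else match cs with
        | [] => []
        | c :: rest => (goB rest k).map (fun s => c ++ s) ++ goB rest (k + 1)
  termination_by cs k => (cs.length, k)

def making_alt (chars : List String) (l : Int) : List String :=
  if l < 1 ∨ ((chars.length : Int) < l) then [] else goB chars l.toNat

-- ===== PRECONDITION & SPEC =====
-- Pre_ excludes exactly l ≤ 0, where Python A recurses forever (RecursionError).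
def Pre_making (_chars : List String) (l : Int) : Prop := 1 ≤ l
instance (chars : List String) (l : Int) : Decidable (Pre_making chars l) := by unfold Pre_making; infer_instance
def pvWitness_making : List String × Int := (["a", "b", "c"], 2)

-- For l ≤ 0 A recurses forever and raises RecursionError, while B returns [].
def Raises_making (_chars : List String) (l : Int) : Prop := l ≤ 0
instance (chars : List String) (l : Int) : Decidable (Raises_making chars l) := by unfold Raises_making; infer_instance
def pvRaiseWitness_making : List String × Int := (["a"], 0)
def pvRaiseWitnessOut_making : List String := []

def Spec_making (chars : List String) (l : Int) (out : List String) : Prop := out = making_alt chars l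
instance (chars : List String) (l : Int) (out : List String) : Decidable (Spec_making chars l out) := by unfold Spec_making; infer_instance

-- ===== CLAIM =====
def Claim_equal_making : Prop := ∀ (chars : List String) (l : Int), Dom_making chars l → Pre_making chars l → Spec_making chars l (making chars l)
def Claim_raises_making : Prop := (∀ (chars : List String) (l : Int), Dom_making chars l → Raises_making chars l → ¬ Pre_making chars l) ∧ (Dom_making (pvRaiseWitness_making.1) (pvRaiseWitness_making.2) ∧ Raises_making (pvRaiseWitness_making.1) (pvRaiseWitness_making.2) ∧ making_alt (pvRaiseWitness_making.1) (pvRaiseWitness_making.2) = pvRaiseWitnessOut_making)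

-- ===== LEMMAS AND PROOFS =====

theorem makingA_one (chars : List String) : makingA chars 1 = chars := by
  show chars.foldl (fun ret c => ret ++ [c]) [] = chars
  have h : ∀ (xs acc : List String), xs.foldl (fun ret c => ret ++ [c]) acc = acc ++ xs := by
    intro xs
    induction xs with
    | nil => simp
    | cons x xs ih => intro acc; simp [List.foldl, ih]
  simpa using h chars []

theorem inner_foldl (c : String) (xs : List String) (acc : List String) :
    xs.foldl (fun ret2 sub => ret2 ++ [c ++ sub]) acc = acc ++ xs.map (fun s => c ++ s) := by
  induction xs generalizing acc with
  | nil => simp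
  | cons x xs ih => simp [List.foldl, ih]

theorem makingA_flatMap (chars : List String) (n : Nat) :
    makingA chars (n + 2) =
      (List.range (chars.length + 1 - (n + 2))).flatMap
        (fun i => (makingA (chars.drop (i + 1)) (n + 1)).map (fun s => chars.getD i "" ++ s)) := by
  show (List.range (chars.length + 1 - (n + 2))).foldl _ [] = _
  have h : ∀ (is : List Nat) (acc : List String),
      is.foldl (fun ret i =>
        (makingA (chars.drop (i + 1)) (n + 1)).foldl
          (fun ret2 sub => ret2 ++ [chars.getD i "" ++ sub]) ret) acc
      = acc ++ is.flatMap
          (fun i => (makingA (chars.drop (i + 1)) (n + 1)).map (fun s => chars.getD i "" ++ s)) := by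
    intro is
    induction is with
    | nil => simp
    | cons i is ih =>
        intro acc
        rw [List.foldl_cons, inner_foldl, ih]
        simp [List.flatMap_cons]
  simpa using h _ []

theorem goB_zero (cs : List String) : goB cs 0 = [""] := by simp [goB]

theorem goB_short (cs : List String) (k : Nat) (h : cs.length < k + 1) : goB cs (k + 1) = [] := by
  cases cs with
  | nil => simp [goB]
  | cons c rest => rw [goB, if_pos h]

theorem goB_cons (c : String) (rest : List String) (k : Nat) (h : ¬ (rest.length + 1 < k + 1)) :
    goB (c :: rest) (k + 1) = (goB rest k).map (fun s => c ++ s) ++ goB rest (k + 1) := by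
  rw [goB, if_neg (by simpa using h)]

-- main equivalence: for k ≥ 1, makingA cs k = goB cs k
theorem makingA_eq_goB (cs : List String) : ∀ k : Nat, makingA cs (k + 1) = goB cs (k + 1) := by
  induction cs with
  | nil =>
      intro k
      cases k with
      | zero => simp [makingA_one, goB_short]
      | succ m => simp [makingA_flatMap, goB_short]
  | cons c rest ih =>
      intro k
      cases k with
      | zero =>
          rw [makingA_one]
          by_cases h : (c :: rest).length < 1
          · simp at h
          · rw [goB_cons c rest 0 (by simpa using h), goB_zero]
            have : makingA rest 1 = goB rest 1 := ih 0
            rw [← this, makingA_one]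
            simp
      | succ m =>
          by_cases h : (c :: rest).length < m + 2
          · -- too short: both empty
            have h' : rest.length + 1 < m + 2 := by simpa using h
            have h0 : (c :: rest).length + 1 - (m + 2) = 0 := by
              simp only [List.length_cons]; omega
            rw [makingA_flatMap, h0, goB_short _ _ (by simpa using h)]
            simp
          · rw [makingA_flatMap, goB_cons c rest (m + 1) (by simpa using h)]
            have hn : (c :: rest).length + 1 - (m + 2) = (rest.length + 1 - (m + 2)) + 1 := by
              simp at h ⊢; omega
            rw [hn, List.range_succ_eq_map]
            simp only [List.flatMap_cons, List.flatMap_map]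
            have h0 : (c :: rest).drop 1 = rest := rfl
            have hget0 : (c :: rest).getD 0 "" = c := rfl
            rw [h0, hget0, ih m]
            congr 1
            rw [← ih (m + 1), makingA_flatMap]
            have : (rest.length + 1 - (m + 2)) = rest.length + 1 - (m + 2) := rfl
            apply List.flatMap_congr
            intro i _
            rfl

-- ===== VERDICT =====
theorem making_spec : Claim_equal_making := by
  intro chars l _ hpre
  unfold Pre_making at hpre
  unfold Spec_making making making_alt
  by_cases hlt : l < 1 ∨ ((chars.length : Int) < l)
  · cases hlt with
    | inl h => exfalso; omega
    | inr h =>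
        simp only [if_pos (Or.inr h)]
        -- A returns [] when chars.length < l
        have hk : ∃ k, l.toNat = k + 1 := ⟨l.toNat - 1, by omega⟩
        obtain ⟨k, hk⟩ := hk
        rw [hk]
        cases k with
        | zero =>
            have : chars.length = 0 := by omega
            simp [makingA_one, List.length_eq_zero_iff.mp this]
        | succ m =>
            rw [makingA_flatMap]
            have : chars.length + 1 - (m + 2) = 0 := by omega
            simp [this]
  · simp only [if_neg hlt]
    have hk : ∃ k, l.toNat = k + 1 := ⟨l.toNat - 1, by omega⟩
    obtain ⟨k, hk⟩ := hk
    rw [hk, makingA_eq_goB]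

theorem making_raises : Claim_raises_making := by
  unfold Claim_raises_making
  constructor
  · intro chars l _ hr hp
    exact absurd hp (by unfold Pre_making Raises_making at *; omega)
  · exact ⟨by decide, by decide, by decide⟩

-- witness self-check: B's value at the raise witness, extracted from the proved claim
theorem making_raises_witness_ok :
    making_alt pvRaiseWitness_making.1 pvRaiseWitness_making.2 = pvRaiseWitnessOut_making :=
  making_raises.2.2.2
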